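-- pv_equiv track=rewrite | github.com/coolmich/geisel | geisel.py | formatedInterval
-- ===== SOURCE A (Python) =====
-- def formatedInterval(start , end):
--   start = 8 if start == None else int(start)
--   end = 23 if end == None else int(end)
--   array = []
--   while start < end:
--     pre = start % 12
--     if pre == 0: pre += 12
--     preZ = "AM" if start < 12 else "PM"
--     pos = (start+1) % 12
--     if pos == 0: pos += 12
--     posZ = "AM" if (start+1) < 12 else "PM"
--     array.append("{}:00 {}-{}:30 {}".format(pre, preZ, pre, preZ))
--     array.append("{}:30 {}-{}:00 {}".format(pre, preZ, pos, posZ))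
--     start += 1
--   return array
-- ===== SOURCE B (Python) =====
-- def _label(t):
--     h, half = divmod(t, 2)
--     return "{}:{} {}".format(h % 12 or 12, "30" if half else "00", "AM" if h < 12 else "PM")
--
-- def formatedInterval(start, end):
--     start = 8 if start is None else int(start)
--     end = 23 if end is None else int(end)
--     labels = [_label(t) for t in range(2 * start, 2 * end + 1)]
--     return [a + "-" + b for a, b in zip(labels, labels[1:])]
-- ===== Notes on version B (the rewrite author's own statement) =====
-- stated objective: alternative
-- what changed: B replaces A's per-hour loop that assembles two interval strings from pre/pos hour variables by a boundary-list decomposition: it formats every half-hour tick once into a flat list of labels and pairs consecutive labels with zip.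
import Mathlib
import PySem

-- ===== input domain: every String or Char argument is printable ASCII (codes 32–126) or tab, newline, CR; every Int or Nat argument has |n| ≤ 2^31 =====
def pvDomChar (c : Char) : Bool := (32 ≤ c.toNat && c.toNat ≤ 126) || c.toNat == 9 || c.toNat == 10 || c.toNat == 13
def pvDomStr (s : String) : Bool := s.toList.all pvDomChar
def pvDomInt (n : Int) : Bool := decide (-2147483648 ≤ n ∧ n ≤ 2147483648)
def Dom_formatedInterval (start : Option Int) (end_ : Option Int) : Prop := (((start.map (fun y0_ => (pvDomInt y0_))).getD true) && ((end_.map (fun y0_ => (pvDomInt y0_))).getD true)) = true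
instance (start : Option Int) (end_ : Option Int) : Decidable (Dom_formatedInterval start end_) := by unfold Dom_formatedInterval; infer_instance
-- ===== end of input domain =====

-- B re-implements A's per-hour two-string loop as a flat list of half-hour boundary labels
-- paired consecutively with zip (same cost; objective: alternative decomposition).

-- ===== PORT A =====
-- the while loop of A, with its growing `array` accumulator
def formatedIntervalGo (e : Int) (array : List String) (s : Int) : List String :=
  if h : s < e then
    let pre0 := PySem.Int.mod s 12
    let pre : Int := if pre0 == 0 then pre0 + 12 else pre0
    let preZ : String := if s < 12 then "AM" else "PM"
    let pos0 := PySem.Int.mod (s + 1) 12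
    let pos : Int := if pos0 == 0 then pos0 + 12 else pos0
    let posZ : String := if s + 1 < 12 then "AM" else "PM"
    formatedIntervalGo e
      (array ++
        [PySem.Int.toStr pre ++ ":00 " ++ preZ ++ "-" ++ PySem.Int.toStr pre ++ ":30 " ++ preZ,
         PySem.Int.toStr pre ++ ":30 " ++ preZ ++ "-" ++ PySem.Int.toStr pos ++ ":00 " ++ posZ])
      (s + 1)
  else array
termination_by (e - s).toNat
decreasing_by omega

def formatedInterval (start : Option Int) (end_ : Option Int) : List String :=
  let s : Int := match start with | none => 8 | some v => v
  let e : Int := match end_ with | none => 23 | some v => v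
  formatedIntervalGo e [] s

-- ===== PORT B =====
-- _label(t): format one half-hour tick t (t = 2*hour + halfFlag)
def fiLabel (t : Int) : String :=
  let h := PySem.Int.floordiv t 2
  let half := PySem.Int.mod t 2
  PySem.Int.toStr (if PySem.Int.mod h 12 == 0 then (12 : Int) else PySem.Int.mod h 12) ++ ":" ++
    (if half == 0 then "00" else "30") ++ " " ++ (if h < 12 then "AM" else "PM")

def formatedInterval_alt (start : Option Int) (end_ : Option Int) : List String :=
  let s : Int := match start with | none => 8 | some v => v
  let e : Int := match end_ with | none => 23 | some v => v
  let labels := (PySem.List.pyRange (2 * s) (2 * e + 1) 1).map fiLabel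
  List.zipWith (fun a b => a ++ "-" ++ b) labels (labels.drop 1)

-- ===== PRECONDITION & SPEC =====
def Spec_formatedInterval (start : Option Int) (end_ : Option Int) (out : List String) : Prop := out = formatedInterval_alt start end_
instance (start : Option Int) (end_ : Option Int) (out : List String) : Decidable (Spec_formatedInterval start end_ out) := by unfold Spec_formatedInterval; infer_instance

-- ===== CLAIM (what is proved, stated in full; the proofs are below) =====
def Claim_equal_formatedInterval : Prop := ∀ (start : Option Int) (end_ : Option Int), Dom_formatedInterval start end_ → Spec_formatedInterval start end_ (formatedInterval start end_)

-- ===== LEMMAS AND PROOFS =====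

-- the two strings A's loop body appends at hour s (pre/pos expanded)
def fiA1 (s : Int) : String :=
  PySem.Int.toStr (if PySem.Int.mod s 12 == 0 then PySem.Int.mod s 12 + 12 else PySem.Int.mod s 12) ++
    ":00 " ++ (if s < 12 then "AM" else "PM") ++ "-" ++
    PySem.Int.toStr (if PySem.Int.mod s 12 == 0 then PySem.Int.mod s 12 + 12 else PySem.Int.mod s 12) ++
    ":30 " ++ (if s < 12 then "AM" else "PM")

def fiA2 (s : Int) : String :=
  PySem.Int.toStr (if PySem.Int.mod s 12 == 0 then PySem.Int.mod s 12 + 12 else PySem.Int.mod s 12) ++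
    ":30 " ++ (if s < 12 then "AM" else "PM") ++ "-" ++
    PySem.Int.toStr (if PySem.Int.mod (s + 1) 12 == 0 then PySem.Int.mod (s + 1) 12 + 12 else PySem.Int.mod (s + 1) 12) ++
    ":00 " ++ (if s + 1 < 12 then "AM" else "PM")

-- B's pair list, parameterised by the hour bounds
def fiPairs (s e : Int) : List String :=
  let labels := (PySem.List.pyRange (2 * s) (2 * e + 1) 1).map fiLabel
  List.zipWith (fun a b => a ++ "-" ++ b) labels (labels.drop 1)

lemma fi_go_step (e : Int) (arr : List String) (s : Int) :
    formatedIntervalGo e arr s =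
      if s < e then formatedIntervalGo e (arr ++ [fiA1 s, fiA2 s]) (s + 1) else arr := by
  rw [formatedIntervalGo.eq_def]
  split <;> rfl

lemma fi_floordiv_even (s : Int) : PySem.Int.floordiv (2 * s) 2 = s := by
  rw [PySem.Int.floordiv_eq_ediv_of_pos (by omega)]; omega

lemma fi_floordiv_odd (s : Int) : PySem.Int.floordiv (2 * s + 1) 2 = s := by
  rw [PySem.Int.floordiv_eq_ediv_of_pos (by omega)]; omega

lemma fi_mod_even (s : Int) : PySem.Int.mod (2 * s) 2 = 0 := by
  rw [PySem.Int.mod_eq_emod_of_pos (by omega)]; omega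

lemma fi_mod_odd (s : Int) : PySem.Int.mod (2 * s + 1) 2 = 1 := by
  rw [PySem.Int.mod_eq_emod_of_pos (by omega)]; omega

lemma fiLabel_even (s : Int) :
    fiLabel (2 * s) =
      PySem.Int.toStr (if PySem.Int.mod s 12 == 0 then (12 : Int) else PySem.Int.mod s 12) ++ ":" ++
        "00" ++ " " ++ (if s < 12 then "AM" else "PM") := by
  show (let h := PySem.Int.floordiv (2 * s) 2
        let half := PySem.Int.mod (2 * s) 2
        PySem.Int.toStr (if PySem.Int.mod h 12 == 0 then (12 : Int) else PySem.Int.mod h 12) ++ ":" ++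
          (if half == 0 then "00" else "30") ++ " " ++ (if h < 12 then "AM" else "PM")) = _
  rw [fi_floordiv_even, fi_mod_even]
  rfl

lemma fiLabel_odd (s : Int) :
    fiLabel (2 * s + 1) =
      PySem.Int.toStr (if PySem.Int.mod s 12 == 0 then (12 : Int) else PySem.Int.mod s 12) ++ ":" ++
        "30" ++ " " ++ (if s < 12 then "AM" else "PM") := by
  show (let h := PySem.Int.floordiv (2 * s + 1) 2
        let half := PySem.Int.mod (2 * s + 1) 2
        PySem.Int.toStr (if PySem.Int.mod h 12 == 0 then (12 : Int) else PySem.Int.mod h 12) ++ ":" ++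
          (if half == 0 then "00" else "30") ++ " " ++ (if h < 12 then "AM" else "PM")) = _
  rw [fi_floordiv_odd, fi_mod_odd]
  rfl

lemma fi_pre_norm (x : Int) :
    (if x == 0 then x + 12 else x) = (if x == 0 then (12 : Int) else x) := by
  by_cases h : x = 0 <;> simp [h]

lemma fi_glue (m1 m2 : String) (a z b w : String) :
    (a ++ ":" ++ m1 ++ " " ++ z) ++ "-" ++ (b ++ ":" ++ m2 ++ " " ++ w) =
      a ++ (":" ++ m1 ++ " ") ++ z ++ "-" ++ b ++ (":" ++ m2 ++ " ") ++ w := by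
  simp [String.append_assoc]

lemma fiA1_eq (s : Int) : fiA1 s = fiLabel (2 * s) ++ "-" ++ fiLabel (2 * s + 1) := by
  rw [fiLabel_even, fiLabel_odd, fi_glue]
  unfold fiA1
  rw [fi_pre_norm]
  rfl

lemma fiA2_eq (s : Int) : fiA2 s = fiLabel (2 * s + 1) ++ "-" ++ fiLabel (2 * s + 1 + 1) := by
  have h2 : (2 * s + 1 + 1 : Int) = 2 * (s + 1) := by ring
  rw [fiLabel_odd, h2, fiLabel_even, fi_glue]
  unfold fiA2
  rw [fi_pre_norm, fi_pre_norm]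
  rfl

lemma fi_pairs_step (s e : Int) (h : s < e) :
    fiPairs s e = fiA1 s :: fiA2 s :: fiPairs (s + 1) e := by
  have h2 : (2 * (s + 1) : Int) = 2 * s + 1 + 1 := by ring
  unfold fiPairs
  rw [h2]
  rw [PySem.List.pyRange_one_cons (by omega : (2 * s : Int) < 2 * e + 1)]
  rw [PySem.List.pyRange_one_cons (by omega : (2 * s + 1 : Int) < 2 * e + 1)]
  rw [PySem.List.pyRange_one_cons (by omega : (2 * s + 1 + 1 : Int) < 2 * e + 1)]
  simp [fiA1_eq, fiA2_eq]

lemma fi_go_append (n : Nat) : ∀ (e s : Int), (e - s).toNat = n → ∀ arr,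
    formatedIntervalGo e arr s = arr ++ formatedIntervalGo e [] s := by
  induction n with
  | zero =>
    intro e s hn arr
    have h : ¬ s < e := by omega
    rw [fi_go_step e arr s, fi_go_step e [] s, if_neg h, if_neg h]
    simp
  | succ n ih =>
    intro e s hn arr
    have h : s < e := by omega
    rw [fi_go_step e arr s, fi_go_step e [] s, if_pos h, if_pos h]
    rw [ih e (s + 1) (by omega) (arr ++ [fiA1 s, fiA2 s]),
        ih e (s + 1) (by omega) ([] ++ [fiA1 s, fiA2 s])]
    simp

lemma fi_main (n : Nat) : ∀ (s e : Int), (e - s).toNat = n →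
    formatedIntervalGo e [] s = fiPairs s e := by
  induction n with
  | zero =>
    intro s e hn
    rw [fi_go_step e [] s, if_neg (show ¬ s < e by omega)]
    rcases lt_or_eq_of_le (by omega : e ≤ s) with hlt | heq
    · unfold fiPairs
      rw [PySem.List.pyRange_one_eq_nil (by omega)]
      rfl
    · subst heq
      unfold fiPairs
      rw [PySem.List.pyRange_one_singleton]
      rfl
  | succ n ih =>
    intro s e hn
    rw [fi_go_step e [] s, if_pos (show s < e by omega),
        fi_go_append n e (s + 1) (by omega) ([] ++ [fiA1 s, fiA2 s])]
    rw [ih (s + 1) e (by omega), fi_pairs_step s e (by omega)]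
    rfl

-- ===== VERDICT (by name: the statement is the Claim_ definition above) =====
theorem formatedInterval_spec : Claim_equal_formatedInterval := by
  intro start end_ _
  unfold Spec_formatedInterval formatedInterval formatedInterval_alt
  cases start <;> cases end_ <;> exact fi_main _ _ _ rfl
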